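-- pv_equiv track=rewrite | github.com/LYZ-Li/ECE592_GenAI_LogiTest | src/runner/inference.py | _template_arguments
-- ===== SOURCE A (Python) =====
-- from typing import List
--
-- def _template_arguments(action_name: str, argument_types: List[str]) -> List[str]:
--     """Return readable placeholder arguments for action dependency templates."""
--     named_templates = {
--         "move": ["?robot", "?from_room", "?to_room"],
--         "inspect_gripper": ["?robot", "?room"],
--         "clean_gripper": ["?robot", "?room"],
--         "calibrate_gripper": ["?robot", "?room"],
--         "inspect_package": ["?robot", "?package", "?room"],
--         "clear_obstruction": ["?robot", "?package", "?room"],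
--         "pickup": ["?robot", "?package", "?room"],
--         "verify_grasp": ["?robot", "?package", "?room"],
--         "regrasp": ["?robot", "?package", "?room"],
--         "drop": ["?robot", "?package", "?room"],
--         "verify_delivery": ["?robot", "?package", "?room"],
--     }
--     if action_name in named_templates:
--         return named_templates[action_name]
--
--     counts: dict[str, int] = {}
--     arguments: List[str] = []
--     for argument_type in argument_types:
--         counts[argument_type] = counts.get(argument_type, 0) + 1
--         suffix = "" if argument_types.count(argument_type) == 1 else f"_{counts[argument_type]}"
--         arguments.append(f"?{argument_type}{suffix}")
--     return arguments
-- ===== SOURCE B (Python) =====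
-- from typing import List
--
-- def _template_arguments(action_name: str, argument_types: List[str]) -> List[str]:
--     """Return readable placeholder arguments for action dependency templates."""
--     named_templates = {
--         "move": ["?robot", "?from_room", "?to_room"],
--         "inspect_gripper": ["?robot", "?room"],
--         "clean_gripper": ["?robot", "?room"],
--         "calibrate_gripper": ["?robot", "?room"],
--         "inspect_package": ["?robot", "?package", "?room"],
--         "clear_obstruction": ["?robot", "?package", "?room"],
--         "pickup": ["?robot", "?package", "?room"],
--         "verify_grasp": ["?robot", "?package", "?room"],
--         "regrasp": ["?robot", "?package", "?room"],
--         "drop": ["?robot", "?package", "?room"],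
--         "verify_delivery": ["?robot", "?package", "?room"],
--     }
--     if action_name in named_templates:
--         return named_templates[action_name]
--
--     positions: dict[str, list[int]] = {}
--     for i, argument_type in enumerate(argument_types):
--         positions.setdefault(argument_type, []).append(i)
--
--     result: List[str] = [None] * len(argument_types)  # type: ignore[list-item]
--     for argument_type, indices in positions.items():
--         if len(indices) == 1:
--             result[indices[0]] = f"?{argument_type}"
--         else:
--             for n, i in enumerate(indices, 1):
--                 result[i] = f"?{argument_type}_{n}"
--     return result
-- ===== Notes on version B (the rewrite author's own statement) =====
-- stated objective: faster
-- what changed: Replaces A's single pass that rescans the whole list with .count() at every element by a two-phase group-then-fill algorithm: one enumerate pass builds a type->indices table, then a preallocated result list is filled group by group (singleton groups get ?type, larger groups ?type_n by rank).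
import Mathlib
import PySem

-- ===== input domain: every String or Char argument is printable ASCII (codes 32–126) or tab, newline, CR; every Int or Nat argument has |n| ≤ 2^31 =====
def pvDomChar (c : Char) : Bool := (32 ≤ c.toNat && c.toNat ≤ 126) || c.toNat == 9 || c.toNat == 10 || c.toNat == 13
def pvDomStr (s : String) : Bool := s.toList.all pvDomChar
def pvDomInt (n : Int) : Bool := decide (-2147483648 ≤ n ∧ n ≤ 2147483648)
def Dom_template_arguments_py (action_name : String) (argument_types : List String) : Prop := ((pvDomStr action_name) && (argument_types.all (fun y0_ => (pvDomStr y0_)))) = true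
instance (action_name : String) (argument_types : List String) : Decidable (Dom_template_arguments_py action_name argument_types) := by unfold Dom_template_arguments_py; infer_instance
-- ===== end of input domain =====

-- B replaces A's per-element rescan of the whole list (.count inside the loop) by a
-- two-phase group-then-fill algorithm: one enumerate pass builds a type → indices table,
-- then a preallocated result list is filled group by group (objective: faster, O(n^2) → O(n)).

-- ===== PORT A =====
def namedTemplatesA : PySem.Dict String (List String) :=
  PySem.Dict.ofList [
    ("move", ["?robot", "?from_room", "?to_room"]),
    ("inspect_gripper", ["?robot", "?room"]),
    ("clean_gripper", ["?robot", "?room"]),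
    ("calibrate_gripper", ["?robot", "?room"]),
    ("inspect_package", ["?robot", "?package", "?room"]),
    ("clear_obstruction", ["?robot", "?package", "?room"]),
    ("pickup", ["?robot", "?package", "?room"]),
    ("verify_grasp", ["?robot", "?package", "?room"]),
    ("regrasp", ["?robot", "?package", "?room"]),
    ("drop", ["?robot", "?package", "?room"]),
    ("verify_delivery", ["?robot", "?package", "?room"])]

def template_arguments_py (action_name : String) (argument_types : List String) : List String :=
  if namedTemplatesA.contains action_name then
    -- named_templates[action_name]: the key is present, so getD never takes its default
    namedTemplatesA.getD action_name []
  else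
    -- counts: dict[str,int]; arguments: list[str]; for argument_type in argument_types: …
    (argument_types.foldl
      (fun (st : PySem.Dict String Int × List String) argument_type =>
        let counts := st.1.insert argument_type (st.1.getD argument_type 0 + 1)
        let suffix := if PySem.List.count argument_types argument_type = 1 then ""
                      else "_" ++ PySem.Int.toStr (counts.getD argument_type 0)
        (counts, st.2 ++ ["?" ++ argument_type ++ suffix]))
      (PySem.Dict.empty, [])).2

-- ===== PORT B =====
def namedTemplatesB : PySem.Dict String (List String) :=
  PySem.Dict.ofList [
    ("move", ["?robot", "?from_room", "?to_room"]),
    ("inspect_gripper", ["?robot", "?room"]),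
    ("clean_gripper", ["?robot", "?room"]),
    ("calibrate_gripper", ["?robot", "?room"]),
    ("inspect_package", ["?robot", "?package", "?room"]),
    ("clear_obstruction", ["?robot", "?package", "?room"]),
    ("pickup", ["?robot", "?package", "?room"]),
    ("verify_grasp", ["?robot", "?package", "?room"]),
    ("regrasp", ["?robot", "?package", "?room"]),
    ("drop", ["?robot", "?package", "?room"]),
    ("verify_delivery", ["?robot", "?package", "?room"])]

-- for i, argument_type in enumerate(argument_types): positions.setdefault(argument_type, []).append(i)
def bPositions (argument_types : List String) : PySem.Dict String (List Int) :=
  (PySem.List.enumerate argument_types 0).foldl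
    (fun d p => d.modify p.2 [] (fun l => l ++ [p.1])) PySem.Dict.empty

-- one group: if len(indices) == 1: result[indices[0]] = f"?{t}" else: for n, i in enumerate(indices, 1): result[i] = f"?{t}_{n}"
-- indices are enumerate indices (0 ≤ i < len(result)), so Python's result[i] = v is List.set at i.toNat
def bFill (result : List (Option String)) (argument_type : String) (indices : List Int) :
    List (Option String) :=
  if indices.length = 1 then
    match PySem.List.pyGet? indices 0 with
    | some i => result.set i.toNat (some ("?" ++ argument_type))
    | none => result  -- unreachable: len(indices) == 1
  else
    (PySem.List.enumerate indices 1).foldl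
      (fun r p => r.set p.2.toNat
        (some ("?" ++ argument_type ++ "_" ++ PySem.Int.toStr p.1))) result

def template_arguments_py_alt (action_name : String) (argument_types : List String) : List String :=
  if namedTemplatesB.contains action_name then
    namedTemplatesB.getD action_name []
  else
    let positions := bPositions argument_types
    -- result = [None] * len(argument_types); for t, indices in positions.items(): …
    let result : List (Option String) := List.replicate argument_types.length none
    let filled := positions.items.foldl (fun r q => bFill r q.1 q.2) result
    -- every position is filled, so each slot holds its string (None never remains)
    filled.map (fun o => o.getD "")

-- ===== PRECONDITION & SPEC =====
def Spec_template_arguments_py (action_name : String) (argument_types : List String) (out : List String) : Prop := out = template_arguments_py_alt action_name argument_types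
instance (action_name : String) (argument_types : List String) (out : List String) : Decidable (Spec_template_arguments_py action_name argument_types out) := by unfold Spec_template_arguments_py; infer_instance

-- ===== CLAIM (what is proved, stated in full; the proofs are below) =====
def Claim_equal_template_arguments_py : Prop := ∀ (action_name : String) (argument_types : List String), Dom_template_arguments_py action_name argument_types → Spec_template_arguments_py action_name argument_types (template_arguments_py action_name argument_types)

-- ===== LEMMAS AND PROOFS =====

-- the value both programs place at position m of the fallback output
def outAt (ts : List String) (m : Nat) : String :=
  "?" ++ ts.getD m "" ++
    (if ts.count (ts.getD m "") = 1 then ""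
     else "_" ++ PySem.Int.toStr (((ts.take (m + 1)).count (ts.getD m "") : Nat) : Int))

-- the indices (from start s) at which t occurs, as B's table stores them
def idxAux (t : String) (ts : List String) (s : Int) : List Int :=
  ((PySem.List.enumerate ts s).filter (fun p => p.2 == t)).map (·.1)

lemma idxAux_cons (t x : String) (ts : List String) (s : Int) :
    idxAux t (x :: ts) s =
      (if x = t then [s] else []) ++ idxAux t ts (s + 1) := by
  simp only [idxAux, PySem.List.enumerate_cons, List.filter_cons]
  by_cases h : x = t <;> simp [h]

lemma idxAux_length (t : String) : ∀ (ts : List String) (s : Int),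
    (idxAux t ts s).length = ts.count t := by
  intro ts
  induction ts with
  | nil => intro s; simp [idxAux]
  | cons x rest ih =>
    intro s
    rw [idxAux_cons]
    by_cases h : x = t <;>
      simp [h, ih]

lemma idxAux_get (t : String) : ∀ (ts : List String) (s : Int) (k : Nat) (i : Int),
    (idxAux t ts s)[k]? = some i →
    ∃ m : Nat, i = s + m ∧ m < ts.length ∧ ts.getD m "" = t ∧
      (ts.take (m + 1)).count t = k + 1 := by
  intro ts
  induction ts with
  | nil => intro s k i h; simp [idxAux] at h
  | cons x rest ih =>
    intro s k i h
    rw [idxAux_cons] at h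
    by_cases hx : x = t
    · subst hx
      rw [if_pos rfl, List.singleton_append] at h
      match k with
      | 0 =>
        simp only [List.getElem?_cons_zero, Option.some.injEq] at h
        exact ⟨0, by omega, by simp, by simp, by simp⟩
      | k + 1 =>
        simp only [List.getElem?_cons_succ] at h
        obtain ⟨m, him, hlt, hget, hcnt⟩ := ih (s + 1) k i h
        refine ⟨m + 1, by omega, by simpa using hlt, by simpa using hget, ?_⟩
        simp [List.take_succ_cons, hcnt]
    · simp only [if_neg hx, List.nil_append] at h
      obtain ⟨m, him, hlt, hget, hcnt⟩ := ih (s + 1) k i h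
      refine ⟨m + 1, by omega, by simpa using hlt, by simpa using hget, ?_⟩
      simp [List.take_succ_cons, hx, hcnt]

lemma idxAux_mem (t : String) : ∀ (ts : List String) (s : Int) (m : Nat),
    m < ts.length → ts.getD m "" = t → (s + m) ∈ idxAux t ts s := by
  intro ts
  induction ts with
  | nil => intro s m h; simp at h
  | cons x rest ih =>
    intro s m hm hget
    rw [idxAux_cons]
    match m with
    | 0 =>
      simp only [List.getD_cons_zero] at hget
      simp [hget]
    | m + 1 =>
      simp only [List.getD_cons_succ] at hget
      have := ih (s + 1) m (by simpa using hm) hget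
      have harith : s + ((m : Nat) + 1 : Nat) = (s + 1) + m := by push_cast; ring
      rw [harith]
      by_cases hx : x = t <;> simp [hx, this]

-- B's positions table holds exactly the index list of each type
lemma bPositions_getD (ts : List String) (t : String) :
    (bPositions ts).getD t [] = idxAux t ts 0 := by
  unfold bPositions idxAux
  have h2 : (PySem.List.enumerate ts 0).foldl
        (fun d p => d.modify p.2 [] (fun l => l ++ [p.1]))
        (PySem.Dict.empty : PySem.Dict String (List Int))
      = ((PySem.List.enumerate ts 0).map (fun p => (p.2, p.1))).foldl
        (fun d q => d.modify q.1 [] (fun l => l ++ [q.2])) PySem.Dict.empty := by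
    rw [List.foldl_map]
  rw [h2, PySem.Dict.getD_foldl_modify_append]
  simp [List.filter_map, PySem.Dict.getD_empty, Function.comp_def]

lemma bPositions_keys_nodup (ts : List String) : (bPositions ts).keys.Nodup := by
  unfold bPositions
  exact PySem.Dict.nodup_keys_foldl_modify_key _ _ _ _ _ (by simp [PySem.Dict.keys_empty])

lemma bPositions_mem_keys (ts : List String) (t : String) :
    t ∈ (bPositions ts).keys ↔ t ∈ ts := by
  unfold bPositions
  rw [PySem.Dict.keys_foldl_modify_key]
  simp [PySem.List.map_snd_enumerate, PySem.Dict.keys_empty, PySem.Set.update_nil_left,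
    PySem.Set.mem_ofList]

-- membership in the index list ↔ the type at that position
lemma mem_idxAux_iff (ts : List String) (t : String) (m : Nat) (hm : m < ts.length) :
    ((m : Nat) : Int) ∈ idxAux t ts 0 ↔ ts.getD m "" = t := by
  constructor
  · intro h
    obtain ⟨k, hk⟩ := List.mem_iff_getElem?.mp h
    obtain ⟨m', him, _, hget, _⟩ := idxAux_get t ts 0 k _ hk
    have hmm : m' = m := by omega
    rwa [hmm] at hget
  · intro h
    have := idxAux_mem t ts 0 m hm h
    simpa using this

-- a fold of in-range writes, each writing the correct value at its position
lemma foldl_set_spec (ts : List String) (wv : Int × Int → String) :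
    ∀ (ps : List (Int × Int)) (r : List (Option String)),
    r.length = ts.length →
    (∀ p ∈ ps, ∃ m : Nat, p.2 = (m : Int) ∧ m < ts.length ∧ wv p = outAt ts m) →
    (ps.foldl (fun r p => r.set p.2.toNat (some (wv p))) r).length = ts.length ∧
    ∀ m : Nat, m < ts.length →
      (ps.foldl (fun r p => r.set p.2.toNat (some (wv p))) r).getD m none =
        if ((m : Nat) : Int) ∈ ps.map (·.2) then some (outAt ts m) else r.getD m none := by
  intro ps
  induction ps with
  | nil => intro r hr _; exact ⟨hr, fun m _ => by simp⟩
  | cons p rest ih =>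
    intro r hr hps
    obtain ⟨m0, hp2, hm0, hwv⟩ := hps p (List.mem_cons_self ..)
    have hr1 : (r.set p.2.toNat (some (wv p))).length = ts.length := by
      simp [hr]
    obtain ⟨ihlen, ihget⟩ := ih (r.set p.2.toNat (some (wv p))) hr1
      (fun q hq => hps q (List.mem_cons_of_mem _ hq))
    refine ⟨ihlen, ?_⟩
    intro m hm
    rw [List.foldl_cons, ihget m hm]
    by_cases hmem : ((m : Nat) : Int) ∈ rest.map (·.2)
    · simp [hmem]
    · have hset : (r.set p.2.toNat (some (wv p))).getD m none =
          if p.2 = ((m : Nat) : Int) then some (outAt ts m) else r.getD m none := by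
        rw [List.getD_eq_getElem?_getD, List.getElem?_set]
        by_cases he : p.2 = ((m : Nat) : Int)
        · rw [if_pos (by omega : p.2.toNat = m),
            if_pos (by omega : p.2.toNat < r.length)]
          have hm0m : m0 = m := by omega
          simp [hwv, hm0m, he]
        · rw [if_neg (by omega : ¬ p.2.toNat = m), if_neg he,
            List.getD_eq_getElem?_getD]
      rw [if_neg hmem, hset]
      simp only [List.map_cons, List.mem_cons, hmem, or_false]
      by_cases he : p.2 = ((m : Nat) : Int)
      · simp [he]
      · simp [he, Ne.symm he]

-- one group fill writes the correct value at exactly the positions of its type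
lemma bFill_spec (ts : List String) (t : String) (_ht : t ∈ ts)
    (r : List (Option String)) (hr : r.length = ts.length) :
    (bFill r t (idxAux t ts 0)).length = ts.length ∧
    ∀ m : Nat, m < ts.length →
      (bFill r t (idxAux t ts 0)).getD m none =
        if ts.getD m "" = t then some (outAt ts m) else r.getD m none := by
  have hlen_idx : (idxAux t ts 0).length = ts.count t := idxAux_length t ts 0
  unfold bFill
  by_cases h1 : (idxAux t ts 0).length = 1
  · obtain ⟨i0, hl⟩ := List.length_eq_one_iff.mp h1
    have hget0 : (idxAux t ts 0)[0]? = some i0 := by rw [hl]; rfl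
    obtain ⟨m0, hi0, hm0, hgt, hcnt⟩ := idxAux_get t ts 0 0 i0 hget0
    have hcount1 : ts.count t = 1 := by rw [← hlen_idx, h1]
    rw [if_pos h1, hl]
    have hpg : PySem.List.pyGet? [i0] (0 : Int) = some i0 := rfl
    rw [hpg]
    refine ⟨by simp [hr], ?_⟩
    intro m hm
    rw [List.getD_eq_getElem?_getD, List.getElem?_set]
    have hmem_iff : ts.getD m "" = t ↔ m = m0 := by
      constructor
      · intro h
        have := (mem_idxAux_iff ts t m hm).mpr h
        rw [hl] at this
        simp only [List.mem_singleton] at this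
        omega
      · intro h; rw [h]; exact hgt
    by_cases he : m = m0
    · rw [if_pos (by omega : i0.toNat = m), if_pos (by omega : i0.toNat < r.length)]
      rw [if_pos (hmem_iff.mpr he)]
      have : outAt ts m = "?" ++ t := by
        unfold outAt
        rw [he, hgt, if_pos hcount1]
        simp
      simp [this]
    · rw [if_neg (by omega : ¬ i0.toNat = m),
        if_neg (fun hcontra => he (hmem_iff.mp hcontra)),
        List.getD_eq_getElem?_getD]
  · rw [if_neg h1]
    have hcnt_ne : ts.count t ≠ 1 := by rw [← hlen_idx]; exact h1
    have hyp : ∀ p ∈ PySem.List.enumerate (idxAux t ts 0) 1, ∃ m1 : Nat,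
        p.2 = ((m1 : Nat) : Int) ∧ m1 < ts.length ∧
        (fun p : Int × Int => "?" ++ t ++ "_" ++ PySem.Int.toStr p.1) p = outAt ts m1 := by
      intro p hp
      obtain ⟨k, hk, hpk⟩ := (PySem.List.mem_enumerate_iff ..).mp hp
      have hgk : (idxAux t ts 0)[k]? = some ((idxAux t ts 0)[k]) :=
        List.getElem?_eq_getElem hk
      obtain ⟨m1, hi1, hm1, hgt1, hcnt1⟩ := idxAux_get t ts 0 k _ hgk
      refine ⟨m1, by rw [hpk]; simpa using hi1, hm1, ?_⟩
      unfold outAt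
      rw [hgt1, if_neg hcnt_ne, hcnt1, hpk]
      have : ((1 : Int) + (k : Nat)) = (((k + 1 : Nat) : Nat) : Int) := by push_cast; ring
      simp [this, String.append_assoc]
    obtain ⟨hlen, hpoint⟩ := foldl_set_spec ts
      (fun p => "?" ++ t ++ "_" ++ PySem.Int.toStr p.1)
      (PySem.List.enumerate (idxAux t ts 0) 1) r hr hyp
    refine ⟨hlen, ?_⟩
    intro m hm
    rw [hpoint m hm, PySem.List.map_snd_enumerate]
    simp only [show ((m : Nat) : Int) ∈ idxAux t ts 0 ↔ ts.getD m "" = t from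
      mem_idxAux_iff ts t m hm]

-- the fold over the groups fills every position whose type is among the processed keys
lemma itemsFold_spec (ts : List String) :
    ∀ (qs : List (String × List Int)) (r : List (Option String)),
    (∀ q ∈ qs, q.1 ∈ ts ∧ q.2 = idxAux q.1 ts 0) →
    r.length = ts.length →
    (qs.foldl (fun r q => bFill r q.1 q.2) r).length = ts.length ∧
    ∀ m : Nat, m < ts.length →
      (qs.foldl (fun r q => bFill r q.1 q.2) r).getD m none =
        if ts.getD m "" ∈ qs.map (·.1) then some (outAt ts m) else r.getD m none := by
  intro qs
  induction qs with
  | nil => intro r _ hr; exact ⟨hr, fun m _ => by simp⟩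
  | cons q rest ih =>
    intro r hqs hr
    obtain ⟨hq1, hq2⟩ := hqs q (List.mem_cons_self ..)
    obtain ⟨hflen, hfpoint⟩ := bFill_spec ts q.1 hq1 r hr
    rw [← hq2] at hflen hfpoint
    obtain ⟨ihlen, ihget⟩ := ih (bFill r q.1 q.2)
      (fun p hp => hqs p (List.mem_cons_of_mem _ hp)) hflen
    refine ⟨ihlen, ?_⟩
    intro m hm
    rw [List.foldl_cons, ihget m hm]
    by_cases hmem : ts.getD m "" ∈ rest.map (·.1)
    · rw [if_pos hmem, List.map_cons, if_pos (List.mem_cons_of_mem _ hmem)]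
    · rw [if_neg hmem, hfpoint m hm]
      simp only [List.map_cons, List.mem_cons, hmem, or_false]

-- B's fallback equals the pointwise description
lemma alt_fallback (ts : List String) :
    ((bPositions ts).items.foldl (fun r q => bFill r q.1 q.2)
        (List.replicate ts.length none)).map (fun o => o.getD "") =
      (List.range ts.length).map (outAt ts) := by
  have hqs : ∀ q ∈ (bPositions ts).items, q.1 ∈ ts ∧ q.2 = idxAux q.1 ts 0 := by
    intro q hq
    have hnd := bPositions_keys_nodup ts
    have hget : (bPositions ts).get? q.1 = some q.2 :=
      PySem.Dict.get?_of_mem_items (bPositions ts)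
        (show (q.1, q.2) ∈ (bPositions ts).items by simpa using hq) hnd
    constructor
    · exact (bPositions_mem_keys ts q.1).mp
        (PySem.Dict.mem_keys_of_mem_items _
          (show (q.1, q.2) ∈ (bPositions ts).items by simpa using hq))
    · rw [← bPositions_getD ts q.1, PySem.Dict.getD_eq_get?_getD, hget]
      rfl
  obtain ⟨hlen, hpoint⟩ := itemsFold_spec ts (bPositions ts).items
    (List.replicate ts.length none) hqs (by simp)
  apply List.ext_getElem
  · simp [hlen]
  · intro m hm1 hm2
    have hm : m < ts.length := by simpa using hm2
    have hsome : ((bPositions ts).items.foldl (fun r q => bFill r q.1 q.2)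
        (List.replicate ts.length none)).getD m none = some (outAt ts m) := by
      rw [hpoint m hm, if_pos]
      have : ts.getD m "" ∈ ts := by
        rw [List.getD_eq_getElem?_getD, List.getElem?_eq_getElem hm]
        exact List.getElem_mem hm
      exact (bPositions_mem_keys ts (ts.getD m "")).mpr this
    rw [List.getD_eq_getElem?_getD, List.getElem?_eq_getElem (by omega : m <
      ((bPositions ts).items.foldl (fun r q => bFill r q.1 q.2)
        (List.replicate ts.length none)).length)] at hsome
    simp only [Option.getD_some] at hsome
    simp [hsome]

-- A's loop equals the pointwise description
lemma aLoop (full : List String) : ∀ (suf pre : List String) (d : PySem.Dict String Int),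
    full = pre ++ suf →
    (∀ t, d.getD t 0 = (pre.count t : Int)) →
    (suf.foldl
      (fun (st : PySem.Dict String Int × List String) argument_type =>
        let counts := st.1.insert argument_type (st.1.getD argument_type 0 + 1)
        let suffix := if PySem.List.count full argument_type = 1 then ""
                      else "_" ++ PySem.Int.toStr (counts.getD argument_type 0)
        (counts, st.2 ++ ["?" ++ argument_type ++ suffix]))
      (d, (List.range pre.length).map (outAt full))).2
      = (List.range full.length).map (outAt full) := by
  intro suf
  induction suf with
  | nil =>
    intro pre d hfull _
    rw [List.append_nil] at hfull
    subst hfull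
    rfl
  | cons x rest ih =>
    intro pre d hfull hd
    have hgetx : full.getD pre.length "" = x := by
      rw [hfull, List.getD_eq_getElem?_getD,
        List.getElem?_append_right (Nat.le_refl pre.length)]
      simp
    have htake : full.take (pre.length + 1) = pre ++ [x] := by
      rw [hfull, List.take_append, List.take_of_length_le (by omega)]
      simp
    have hnew : ∀ t, (d.insert x (d.getD x 0 + 1)).getD t 0 =
        (((pre ++ [x]).count t : Nat) : Int) := by
      intro t
      rw [PySem.Dict.getD_insert, List.count_append]
      by_cases he : t = x
      · rw [if_pos he, hd, he]
        simp
      · rw [if_neg he, hd]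
        have : [x].count t = 0 := by
          simp [List.count_singleton]
          exact fun h => he h.symm
        rw [this]
        simp
    have harg : (List.range pre.length).map (outAt full) ++
        ["?" ++ x ++ (if PySem.List.count full x = 1 then ""
          else "_" ++ PySem.Int.toStr ((d.insert x (d.getD x 0 + 1)).getD x 0))] =
        (List.range (pre ++ [x]).length).map (outAt full) := by
      have helem : ("?" ++ x ++ (if PySem.List.count full x = 1 then ""
          else "_" ++ PySem.Int.toStr ((d.insert x (d.getD x 0 + 1)).getD x 0)))
          = outAt full pre.length := by
        unfold outAt
        rw [hgetx, PySem.List.count_eq, hnew x, htake]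
      rw [List.length_append, List.length_cons, List.length_nil, List.range_succ,
        List.map_append, List.map_singleton, helem]
    rw [List.foldl_cons]
    calc (rest.foldl
        (fun (st : PySem.Dict String Int × List String) argument_type =>
          let counts := st.1.insert argument_type (st.1.getD argument_type 0 + 1)
          let suffix := if PySem.List.count full argument_type = 1 then ""
                        else "_" ++ PySem.Int.toStr (counts.getD argument_type 0)
          (counts, st.2 ++ ["?" ++ argument_type ++ suffix]))
        (d.insert x (d.getD x 0 + 1),
          (List.range pre.length).map (outAt full) ++
            ["?" ++ x ++ (if PySem.List.count full x = 1 then ""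
              else "_" ++ PySem.Int.toStr ((d.insert x (d.getD x 0 + 1)).getD x 0))])).2
        = (List.range full.length).map (outAt full) := by
          rw [harg]
          exact ih (pre ++ [x]) (d.insert x (d.getD x 0 + 1))
            (by rw [hfull, List.append_assoc]; rfl) hnew

-- ===== VERDICT (by name: the statement is the Claim_ definition above) =====
theorem template_arguments_py_spec : Claim_equal_template_arguments_py := by
  intro action_name ts _
  unfold Spec_template_arguments_py template_arguments_py template_arguments_py_alt
  have htab : namedTemplatesA = namedTemplatesB := rfl
  rw [htab]
  by_cases hc : namedTemplatesB.contains action_name = true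
  · simp [hc]
  · simp only [hc, Bool.false_eq_true, if_false]
    have hA := aLoop ts ts [] PySem.Dict.empty (by simp) (by intro t; simp [PySem.Dict.getD_empty])
    simp only [List.length_nil, List.range_zero, List.map_nil] at hA
    rw [hA, alt_fallback]
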